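-- pv_equiv track=rewrite | github.com/leeluse/trinity-chimera | ai_trading/arbiter/market_analyzer.py | _calculate_regime_duration
-- ===== SOURCE A (Python) =====
-- from typing import Any, Dict, List, Optional, Tuple
--
-- def _calculate_regime_duration(
--
--     regimes: List[str],
-- ) -> Dict[str, int]:
--     """Calculate average duration per regime.
--
--     Args:
--         regimes: List of sequential regimes
--
--     Returns:
--         Average durations
--     """
--     if not regimes:
--         return {}
--
--     durations: Dict[str, List[int]] = {}
--     current = regimes[0]
--     count = 1
--
--     for r in regimes[1:]:
--         if r == current:
--             count += 1
--         else:
--             if current not in durations: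
--                 durations[current] = []
--             durations[current].append(count)
--             current = r
--             count = 1
--
--     if current not in durations:
--         durations[current] = []
--     durations[current].append(count)
--
--     return {r: sum(d) // len(d) for r, d in durations.items()}
-- ===== SOURCE B (Python) =====
-- def _calculate_regime_duration(regimes):
--     """Average run-length per regime computed without run lengths: each label's
--     total occurrences divided (floor) by its number of run starts (positions
--     where the label differs from its predecessor)."""
--     totals = {}
--     starts = {}
--     prev = None
--     for r in regimes:
--         totals[r] = totals.get(r, 0) + 1
--         if r != prev:
--             starts[r] = starts.get(r, 0) + 1
--         prev = r
--     return {r: totals[r] // starts[r] for r in totals}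
-- ===== Notes on version B (the rewrite author's own statement) =====
-- stated objective: alternative
-- what changed: B never forms run lengths: it counts, in one pass, each label's total occurrences and its number of run starts (r != prev), and returns occurrences // run-starts, replacing A's current/count state machine with its dict of per-run length lists and duplicated post-loop flush.
import Mathlib
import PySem

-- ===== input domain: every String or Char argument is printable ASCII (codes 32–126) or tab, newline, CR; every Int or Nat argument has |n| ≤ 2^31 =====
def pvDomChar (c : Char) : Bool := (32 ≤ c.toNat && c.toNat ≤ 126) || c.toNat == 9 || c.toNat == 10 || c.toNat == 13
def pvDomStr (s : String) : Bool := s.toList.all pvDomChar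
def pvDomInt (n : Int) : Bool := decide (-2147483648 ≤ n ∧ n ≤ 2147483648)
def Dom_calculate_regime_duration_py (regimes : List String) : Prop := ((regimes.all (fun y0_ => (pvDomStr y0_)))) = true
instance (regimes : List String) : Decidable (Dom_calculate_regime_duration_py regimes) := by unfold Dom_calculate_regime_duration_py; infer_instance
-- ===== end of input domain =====

-- B never forms run lengths: in one pass it counts each label's total occurrences and its
-- number of run starts (r != prev) and returns occurrences // run-starts, replacing A's
-- current/count state machine (dict of per-run length lists, duplicated flush); same O(n) cost.

-- ===== PORT A =====
-- 'if current not in durations: durations[current] = []; durations[current].append(count)'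
def pvARecord (durations : PySem.Dict String (List Int)) (current : String) (count : Int) :
    PySem.Dict String (List Int) :=
  let d := if durations.contains current then durations else durations.insert current []
  d.modify current [] (fun l => l ++ [count])

-- the body of A's 'for r in regimes[1:]' loop over state (durations, current, count)
def pvAStep (s : PySem.Dict String (List Int) × String × Int) (r : String) :
    PySem.Dict String (List Int) × String × Int :=
  if r == s.2.1 then (s.1, s.2.1, s.2.2 + 1)
  else (pvARecord s.1 s.2.1 s.2.2, r, 1)

-- the final dict comprehension has the (distinct) keys of 'durations', so its association
-- list is exactly this map over durations.items
def calculate_regime_duration_py (regimes : List String) : List (String × Int) :=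
  match regimes with
  | [] => []
  | r0 :: rest =>
    let st := rest.foldl pvAStep (PySem.Dict.empty, r0, 1)
    let durations := pvARecord st.1 st.2.1 st.2.2
    durations.items.map (fun p => (p.1, PySem.Int.floordiv p.2.sum (p.2.length : Int)))

-- ===== PORT B =====
-- body of B's loop over state (totals, starts, prev): 'totals[r] = totals.get(r,0)+1;
-- if r != prev: starts[r] = starts.get(r,0)+1; prev = r'  (prev: Optional[str], None at first)
def pvBStep (s : PySem.Dict String Int × PySem.Dict String Int × Option String) (r : String) :
    PySem.Dict String Int × PySem.Dict String Int × Option String :=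
  (s.1.insert r (s.1.getD r 0 + 1),
   if some r == s.2.2 then s.2.1 else s.2.1.insert r (s.2.1.getD r 0 + 1),
   some r)

-- the final dict comprehension iterates over totals' (distinct) keys; 'totals[r]'/'starts[r]'
-- never miss (r is a key of both), so getD is exact
def calculate_regime_duration_py_alt (regimes : List String) : List (String × Int) :=
  let tc := regimes.foldl pvBStep (PySem.Dict.empty, PySem.Dict.empty, none)
  tc.1.keys.map (fun r => (r, PySem.Int.floordiv (tc.1.getD r 0) (tc.2.1.getD r 0)))

-- ===== PRECONDITION & SPEC =====
def Spec_calculate_regime_duration_py (regimes : List String) (out : List (String × Int)) : Prop := out = calculate_regime_duration_py_alt regimes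
instance (regimes : List String) (out : List (String × Int)) : Decidable (Spec_calculate_regime_duration_py regimes out) := by unfold Spec_calculate_regime_duration_py; infer_instance

-- ===== CLAIM (what is proved, stated in full; the proofs are below) =====
def Claim_equal_calculate_regime_duration_py : Prop := ∀ (regimes : List String), Dom_calculate_regime_duration_py regimes → Spec_calculate_regime_duration_py regimes (calculate_regime_duration_py regimes)

-- ===== LEMMAS AND PROOFS =====

-- canonical run-length encoding of (current repeated count) ++ l
def pvCrle (current : String) (count : Int) : List String → List (String × Int)
  | [] => [(current, count)]
  | r :: rest => if r == current then pvCrle current (count + 1) rest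
                 else (current, count) :: pvCrle r 1 rest

-- run-at-a-time aggregation of (totals, starts): a proof-side device both sides reduce to
def pvAgg (s : PySem.Dict String Int × PySem.Dict String Int) (p : String × Int) :
    PySem.Dict String Int × PySem.Dict String Int :=
  (s.1.insert p.1 (s.1.getD p.1 0 + p.2), s.2.insert p.1 (s.2.getD p.1 0 + 1))

theorem pvAloop_eq_crle (l : List String) (c : String) (k : Int)
    (D : PySem.Dict String (List Int)) :
    pvARecord (l.foldl pvAStep (D, c, k)).1 (l.foldl pvAStep (D, c, k)).2.1
        (l.foldl pvAStep (D, c, k)).2.2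
      = (pvCrle c k l).foldl (fun d p => pvARecord d p.1 p.2) D := by
  induction l generalizing c k D with
  | nil => simp [pvCrle]
  | cons r rest ih =>
    by_cases h : (r == c) = true
    · have h1 : pvCrle c k (r :: rest) = pvCrle c (k + 1) rest := by simp [pvCrle, h]
      have h2 : pvAStep (D, c, k) r = (D, c, k + 1) := by simp [pvAStep, h]
      rw [List.foldl_cons, h2, h1]
      exact ih c (k + 1) D
    · have hf : (r == c) = false := by simpa using h
      have h1 : pvCrle c k (r :: rest) = (c, k) :: pvCrle r 1 rest := by simp [pvCrle, hf]
      have h2 : pvAStep (D, c, k) r = (pvARecord D c k, r, 1) := by simp [pvAStep, hf]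
      rw [List.foldl_cons, h2, h1, List.foldl_cons]
      exact ih r 1 (pvARecord D c k)

-- overwriting the same key twice keeps only the last write
theorem pv_insert_insert_same (d : PySem.Dict String Int) (k : String) (v w : Int) :
    (d.insert k v).insert k w = d.insert k w := by
  apply PySem.Dict.ext
  by_cases h : d.contains k = true
  · rw [PySem.Dict.items_insert_of_contains _ w (PySem.Dict.contains_insert_self d k v),
        PySem.Dict.items_insert_of_contains _ v h,
        PySem.Dict.items_insert_of_contains _ w h, List.map_map]
    apply List.map_congr_left
    intro p _
    by_cases hp : (p.1 == k) = true <;> simp [Function.comp, hp]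
  · have h' : d.contains k = false := by simpa using h
    rw [PySem.Dict.items_insert_of_contains _ w (PySem.Dict.contains_insert_self d k v),
        PySem.Dict.items_insert_of_not_contains _ v h',
        PySem.Dict.items_insert_of_not_contains _ w h', List.map_append]
    have hmem : ∀ p ∈ d.items, p.1 ≠ k := by
      intro p hp hpk
      have : k ∈ d.keys := hpk ▸ PySem.Dict.mem_keys_of_mem_items d hp
      rw [PySem.Dict.contains_eq_decide_mem_keys] at h'
      simp [this] at h'
    have hid : d.items.map (fun p => if p.1 == k then (k, w) else p) = d.items.map id :=
      List.map_congr_left (fun p hp => by simp [hmem p hp])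
    simp only [List.map_id, beq_iff_eq] at hid
    simp [hid]

-- B's one-label-at-a-time loop, run from a mid-run state, aggregates exactly the runs pvCrle
theorem pvBloop_eq_crle (l : List String) (c : String) (k : Int)
    (T C : PySem.Dict String Int) :
    ((l.foldl pvBStep (T.insert c (T.getD c 0 + k), C.insert c (C.getD c 0 + 1), some c)).1,
     (l.foldl pvBStep (T.insert c (T.getD c 0 + k), C.insert c (C.getD c 0 + 1), some c)).2.1)
      = (pvCrle c k l).foldl pvAgg (T, C) := by
  induction l generalizing c k T C with
  | nil => simp [pvCrle, pvAgg]
  | cons r rest ih =>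
    by_cases h : (r == c) = true
    · have hc : r = c := eq_of_beq h
      subst hc
      have hstep : pvBStep (T.insert r (T.getD r 0 + k), C.insert r (C.getD r 0 + 1), some r) r
          = (T.insert r (T.getD r 0 + (k + 1)), C.insert r (C.getD r 0 + 1), some r) := by
        simp only [pvBStep, beq_self_eq_true, if_pos]
        rw [PySem.Dict.getD_insert_self, pv_insert_insert_same]
        ring_nf
      rw [List.foldl_cons, hstep]
      have h1 : pvCrle r k (r :: rest) = pvCrle r (k + 1) rest := by simp [pvCrle]
      rw [h1]
      exact ih r (k + 1) T C
    · have hf : (r == c) = false := by simpa using h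
      have hrc : some r ≠ some c := by
        simp only [ne_eq, Option.some.injEq]
        exact fun e => by simp [e] at hf
      have hstep : pvBStep (T.insert c (T.getD c 0 + k), C.insert c (C.getD c 0 + 1), some c) r
          = ((T.insert c (T.getD c 0 + k)).insert r
                ((T.insert c (T.getD c 0 + k)).getD r 0 + 1),
             (C.insert c (C.getD c 0 + 1)).insert r
                ((C.insert c (C.getD c 0 + 1)).getD r 0 + 1),
             some r) := by
        have hb : (some r == some c) = false := by simp [hf]
        simp [pvBStep, hb]
      rw [List.foldl_cons, hstep]
      have h1 : pvCrle c k (r :: rest) = (c, k) :: pvCrle r 1 rest := by simp [pvCrle, hf]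
      rw [h1, List.foldl_cons]
      exact ih r 1 (T.insert c (T.getD c 0 + k)) (C.insert c (C.getD c 0 + 1))

-- coupling invariant between A's dict of run-length lists and the (totals, starts) dicts
def pvInv (D : PySem.Dict String (List Int))
    (T C : PySem.Dict String Int) : Prop :=
  D.keys.Nodup ∧ T.keys = D.keys ∧ C.keys = D.keys ∧
  ∀ r, T.getD r 0 = (D.getD r []).sum ∧ C.getD r 0 = ((D.getD r []).length : Int)

theorem pvInv_step (D : PySem.Dict String (List Int)) (T C : PySem.Dict String Int)
    (h : pvInv D T C) (c : String) (k : Int) :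
    pvInv (pvARecord D c k) (T.insert c (T.getD c 0 + k)) (C.insert c (C.getD c 0 + 1)) := by
  obtain ⟨hnd, hT, hC, hval⟩ := h
  have hcont : T.contains c = D.contains c := by
    simp [PySem.Dict.contains_eq_decide_mem_keys, hT]
  have hcontC : C.contains c = D.contains c := by
    simp [PySem.Dict.contains_eq_decide_mem_keys, hC]
  by_cases hc : D.contains c = true
  · have hkeysD : (pvARecord D c k).keys = D.keys := by
      simp only [pvARecord, hc, if_true, PySem.Dict.keys_modify]
      exact PySem.Dict.keys_insert_of_contains D _ hc
    refine ⟨by rw [hkeysD]; exact hnd, ?_, ?_, ?_⟩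
    · rw [PySem.Dict.keys_insert_of_contains T _ (by rw [hcont]; exact hc), hT, hkeysD]
    · rw [PySem.Dict.keys_insert_of_contains C _ (by rw [hcontC]; exact hc), hC, hkeysD]
    · intro r
      by_cases hr : r = c
      · subst hr
        simp [pvARecord, hc, PySem.Dict.getD_insert_self, PySem.Dict.getD_modify_self,
          (hval r).1, (hval r).2]
      · simp [pvARecord, hc, PySem.Dict.getD_insert, PySem.Dict.getD_modify, hr, hval r]
  · have hc' : D.contains c = false := by simpa using hc
    have hcnotin : c ∉ D.keys := by
      rw [PySem.Dict.contains_eq_decide_mem_keys] at hc'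
      simpa using hc'
    have hkeysD : (pvARecord D c k).keys = D.keys ++ [c] := by
      simp only [pvARecord, hc', Bool.false_eq_true, if_false, PySem.Dict.keys_modify]
      rw [PySem.Dict.keys_insert_of_contains _ _ (PySem.Dict.contains_insert_self D c []),
        PySem.Dict.keys_insert_of_not_contains D _ hc']
    refine ⟨?_, ?_, ?_, ?_⟩
    · rw [hkeysD, List.nodup_append]
      refine ⟨hnd, List.nodup_singleton c, ?_⟩
      intro a ha b hb
      simp only [List.mem_singleton] at hb
      subst hb; exact fun hab => hcnotin (hab ▸ ha)
    · rw [PySem.Dict.keys_insert_of_not_contains T _ (by rw [hcont]; exact hc'), hT, hkeysD]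
    · rw [PySem.Dict.keys_insert_of_not_contains C _ (by rw [hcontC]; exact hc'), hC, hkeysD]
    · intro r
      by_cases hr : r = c
      · subst hr
        have hD0 : D.getD r ([] : List Int) = [] :=
          PySem.Dict.getD_of_not_contains D ([] : List Int) hc'
        simp [pvARecord, hc', PySem.Dict.getD_insert_self, PySem.Dict.getD_modify_self,
          (hval r).1, (hval r).2, hD0]
      · simp [pvARecord, hc', PySem.Dict.getD_insert, PySem.Dict.getD_modify, hr, hval r]

theorem pvInv_foldl (rs : List (String × Int)) (D : PySem.Dict String (List Int))
    (T C : PySem.Dict String Int) (h : pvInv D T C) :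
    pvInv (rs.foldl (fun d p => pvARecord d p.1 p.2) D)
      (rs.foldl pvAgg (T, C)).1 (rs.foldl pvAgg (T, C)).2 := by
  induction rs generalizing D T C with
  | nil => simpa using h
  | cons p rest ih =>
    simpa [pvAgg] using ih _ _ _ (pvInv_step D T C h p.1 p.2)

theorem pvInv_final (D : PySem.Dict String (List Int)) (T C : PySem.Dict String Int)
    (h : pvInv D T C) :
    D.items.map (fun p => (p.1, PySem.Int.floordiv p.2.sum (p.2.length : Int)))
      = T.keys.map (fun r => (r, PySem.Int.floordiv (T.getD r 0) (C.getD r 0))) := by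
  obtain ⟨hnd, hT, hC, hval⟩ := h
  have hkeys : D.keys = D.items.map Prod.fst := rfl
  rw [hT, hkeys, List.map_map]
  apply List.map_congr_left
  intro p hp
  have hD : D.getD p.1 [] = p.2 :=
    PySem.Dict.getD_of_mem_items D (k := p.1) (v := p.2) (by simpa using hp) hnd []
  simp [Function.comp, (hval p.1).1, (hval p.1).2, hD]

theorem pvInv_empty :
    pvInv (PySem.Dict.empty : PySem.Dict String (List Int)) PySem.Dict.empty PySem.Dict.empty := by
  refine ⟨by simp [PySem.Dict.keys_empty], rfl, rfl, ?_⟩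
  intro r
  simp [PySem.Dict.getD_empty]

-- ===== VERDICT (by name: the statement is the Claim_ definition above) =====
theorem calculate_regime_duration_py_spec : Claim_equal_calculate_regime_duration_py := by
  intro regimes _
  unfold Spec_calculate_regime_duration_py
  match regimes with
  | [] => rfl
  | r0 :: rest =>
    show (pvARecord (rest.foldl pvAStep (PySem.Dict.empty, r0, 1)).1
            (rest.foldl pvAStep (PySem.Dict.empty, r0, 1)).2.1
            (rest.foldl pvAStep (PySem.Dict.empty, r0, 1)).2.2).items.map
            (fun p => (p.1, PySem.Int.floordiv p.2.sum (p.2.length : Int)))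
        = calculate_regime_duration_py_alt (r0 :: rest)
    have hstep0 : pvBStep (PySem.Dict.empty, PySem.Dict.empty, none) r0
        = ((PySem.Dict.empty : PySem.Dict String Int).insert r0
              ((PySem.Dict.empty : PySem.Dict String Int).getD r0 0 + 1),
           (PySem.Dict.empty : PySem.Dict String Int).insert r0
              ((PySem.Dict.empty : PySem.Dict String Int).getD r0 0 + 1),
           some r0) := by
      simp [pvBStep]
    have hB := pvBloop_eq_crle rest r0 1 PySem.Dict.empty PySem.Dict.empty
    rw [pvAloop_eq_crle]
    show _ = ((r0 :: rest).foldl pvBStep (PySem.Dict.empty, PySem.Dict.empty, none)).1.keys.map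
        (fun r => (r, PySem.Int.floordiv
          (((r0 :: rest).foldl pvBStep (PySem.Dict.empty, PySem.Dict.empty, none)).1.getD r 0)
          (((r0 :: rest).foldl pvBStep (PySem.Dict.empty, PySem.Dict.empty, none)).2.1.getD r 0)))
    rw [List.foldl_cons, hstep0]
    have hT := congrArg Prod.fst hB
    have hC := congrArg Prod.snd hB
    simp only at hT hC
    rw [hT, hC]
    exact pvInv_final _ _ _
      (pvInv_foldl (pvCrle r0 1 rest) _ _ _ pvInv_empty)
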